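-- pv_equiv track=rewrite | github.com/rajasekhar02/reading-x-source-code | Complete Reference/Maths/7-4-2023_leetcode_137.py | singleNumber32N
-- ===== SOURCE A (Python) =====
-- from typing import List
--
-- def singleNumber32N(nums: List[int]) -> int:
--     ans = 0
--     for j in range(0,32):
--         sum = 0
--         sum1 = 0
--         for i in nums:
--             # i & (1<<(j)) => 8
--             # (i>>j) & 1 => 4
--             # sum1 += i & (1<<(j))
--             num = i
--             if num < 0:
--                 num = num & ((1<<32)-1)
--             sum += num>>j & 1
--         sum = sum % 3
--         ans |= sum << j
--     if ans >= (1<<31):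
--         ans -= (1<<32)
--     return ans
-- ===== SOURCE B (Python) =====
-- from typing import List
--
-- # Single pass ones/twos bitmask state machine over the 32-bit two's-complement
-- # representation: ones/twos hold the bits whose count so far is ==1 / ==2 (mod 3).
-- # A ORs (count%3)<<j per bit j, which equals ones | (twos << 1); same sign fix.
-- def singleNumber32N(nums: List[int]) -> int:
--     MASK = 0xFFFFFFFF
--     ones = 0
--     twos = 0
--     for n in nums:
--         m = n & MASK
--         ones = (ones ^ m) & (MASK ^ twos)
--         twos = (twos ^ m) & (MASK ^ ones)
--     r = ones | (twos << 1)
--     if r >= (1 << 31):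
--         r -= (1 << 32)
--     return r
-- ===== Notes on version B (the rewrite author's own statement) =====
-- stated objective: faster
-- what changed: Replaced the 32-iteration outer loop (one full scan of nums per bit, counting each bit position mod 3) by a single pass over nums maintaining the classic ones/twos bitmask state machine that tracks all 32 bit-counts mod 3 at once; the result is assembled as ones | (twos << 1), which is exactly the value A's per-bit OR accumulation produces.
import Mathlib
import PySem

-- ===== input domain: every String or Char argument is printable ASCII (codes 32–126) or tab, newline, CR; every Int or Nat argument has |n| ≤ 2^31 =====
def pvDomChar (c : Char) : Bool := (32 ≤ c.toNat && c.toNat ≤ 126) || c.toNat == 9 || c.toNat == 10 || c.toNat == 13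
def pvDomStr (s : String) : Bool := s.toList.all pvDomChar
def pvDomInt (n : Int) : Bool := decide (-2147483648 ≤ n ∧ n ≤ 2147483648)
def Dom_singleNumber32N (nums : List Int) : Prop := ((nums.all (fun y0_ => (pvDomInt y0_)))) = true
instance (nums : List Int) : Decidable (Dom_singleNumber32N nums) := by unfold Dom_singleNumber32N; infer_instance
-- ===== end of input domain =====

-- B changes A's 32 scans of nums (one per bit position, counting that bit mod 3) into ONE
-- scan maintaining the ones/twos bitmask state machine; same return value.

-- ===== PORT A =====
-- Python values here are nonnegative ints, kept as Nat:
-- `num & ((1<<32)-1)` for num<0 is exactly `num % 2**32` (Python two's-complement &);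
-- `num >> j & 1` on the nonnegative num is exactly Nat `>>>` / `&&&`.
def singleNumber32N (nums : List Int) : Int :=
  let ans : Nat :=
    (List.range 32).foldl (fun ans j =>
      let sum : Nat := nums.foldl (fun sum i =>
        let num : Nat := if i < 0 then (i % (4294967296 : Int)).toNat else i.toNat
        sum + ((num >>> j) &&& 1)) 0
      ans ||| ((sum % 3) <<< j)) 0
  if ans ≥ 2 ^ 31 then (ans : Int) - 2 ^ 32 else (ans : Int)

-- ===== PORT B =====
-- `n & 0xFFFFFFFF` is exactly `n % 2**32` for every Python int; the state is a pair of
-- nonnegative 32-bit ints, kept as Nat.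
def singleNumber32N_alt (nums : List Int) : Int :=
  let MASK : Nat := 4294967295
  let p : Nat × Nat := nums.foldl (fun p n =>
      let m : Nat := (n % (4294967296 : Int)).toNat
      let ones := (p.1 ^^^ m) &&& (MASK ^^^ p.2)
      let twos := (p.2 ^^^ m) &&& (MASK ^^^ ones)
      (ones, twos)) (0, 0)
  let r : Nat := p.1 ||| (p.2 <<< 1)
  if r ≥ 2 ^ 31 then (r : Int) - 2 ^ 32 else (r : Int)

-- ===== PRECONDITION & SPEC =====
def Spec_singleNumber32N (nums : List Int) (out : Int) : Prop := out = singleNumber32N_alt nums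
instance (nums : List Int) (out : Int) : Decidable (Spec_singleNumber32N nums out) := by unfold Spec_singleNumber32N; infer_instance

-- ===== CLAIM (what is proved, stated in full; the proofs are below) =====
def Claim_equal_singleNumber32N : Prop := ∀ (nums : List Int), Dom_singleNumber32N nums → Spec_singleNumber32N nums (singleNumber32N nums)

-- ===== LEMMAS AND PROOFS =====

-- the 32-bit two's-complement representation of i, as a Nat
def pvMval (i : Int) : Nat := (i % (4294967296 : Int)).toNat

-- how many elements of nums have bit k set (in 32-bit representation)
def pvCnt (nums : List Int) (k : Nat) : Nat := nums.countP (fun i => (pvMval i).testBit k)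

theorem pvMval_lt (i : Int) : pvMval i < 2 ^ 32 := by
  unfold pvMval
  have h1 : (0 : Int) ≤ i % 4294967296 := Int.emod_nonneg i (by norm_num)
  have h2 : i % 4294967296 < 4294967296 := Int.emod_lt_of_pos i (by norm_num)
  omega

theorem pvNumA_eq (i : Int) (hd : pvDomInt i = true) :
    (if i < 0 then (i % (4294967296 : Int)).toNat else i.toNat) = pvMval i := by
  unfold pvDomInt at hd
  unfold pvMval
  split
  · rfl
  · rename_i h
    rw [Int.emod_eq_of_lt (by omega) (by simp at hd; omega)]

theorem pvBitExtract (m j : Nat) : (m >>> j) &&& 1 = (if m.testBit j then 1 else 0) := by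
  rw [Nat.and_one_is_mod, Nat.shiftRight_eq_div_pow, Nat.testBit_eq_decide_div_mod_eq]
  rcases Nat.mod_two_eq_zero_or_one (m / 2 ^ j) with h | h <;> simp [h]

theorem pvSumA (j : Nat) : ∀ (nums : List Int) (s : Nat), (∀ i ∈ nums, pvDomInt i = true) →
    nums.foldl (fun sum i =>
      let num : Nat := if i < 0 then (i % (4294967296 : Int)).toNat else i.toNat
      sum + ((num >>> j) &&& 1)) s = s + pvCnt nums j := by
  intro nums
  induction nums with
  | nil => intro s _; simp [pvCnt]
  | cons i rest ih =>
    intro s h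
    have hi : pvDomInt i = true := h i (List.mem_cons_self ..)
    simp only [List.foldl_cons]
    rw [ih _ (fun x hx => h x (List.mem_cons_of_mem _ hx))]
    simp only [pvCnt, List.countP_cons, pvNumA_eq i hi, pvBitExtract]
    split <;> omega

theorem pvTestBitLt3 (x t : Nat) (hx : x < 3) :
    x.testBit t = ((decide (x = 1) && decide (t = 0)) || (decide (x = 2) && decide (t = 1))) := by
  rcases t with _ | _ | t
  · interval_cases x <;> simp [Nat.testBit_eq_decide_div_mod_eq]
  · interval_cases x <;> simp [Nat.testBit_eq_decide_div_mod_eq]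
  · have h : x < 2 ^ (t + 2) :=
      calc x < 4 := by omega
        _ = 2 ^ 2 := rfl
        _ ≤ 2 ^ (t + 2) := Nat.pow_le_pow_right (by norm_num) (by omega)
    rw [Nat.testBit_lt_two_pow h]
    simp

-- bit k of A's accumulated answer after processing bit positions 0..n-1
theorem pvAnsBits (c : Nat → Nat) : ∀ (n k : Nat),
    ((List.range n).foldl (fun ans j => ans ||| ((c j % 3) <<< j)) 0).testBit k =
      ((decide (k < n) && decide (c k % 3 = 1)) ||
       (decide (1 ≤ k) && decide (k ≤ n) && decide (c (k - 1) % 3 = 2))) := by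
  intro n
  induction n with
  | zero => intro k; simp; omega
  | succ n ih =>
    intro k
    rw [List.range_succ, List.foldl_append]
    simp only [List.foldl_cons, List.foldl_nil]
    rw [Nat.testBit_or, ih k, Nat.testBit_shiftLeft,
        pvTestBitLt3 _ _ (Nat.mod_lt _ (by norm_num))]
    rcases Nat.lt_trichotomy k n with h | h | h
    · simp only [ge_iff_le]
      have h1 : ¬ n ≤ k := by omega
      simp [h1, show k < n by omega, show k < n + 1 by omega, show (k ≤ n) = True by simp; omega,
            show (k ≤ n + 1) = True by simp; omega]
    · subst h
      have hk0 : k - k = 0 := by omega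
      by_cases h2 : 1 ≤ k <;>
        by_cases hc1 : c k % 3 = 1 <;>
          by_cases hc2 : c (k - 1) % 3 = 2 <;>
            simp_all
    · -- k > n : k < n false, k ≤ n false; shifted part decides on k - n = 0 / 1
      have h1 : ¬ k < n := by omega
      have h2 : ¬ k ≤ n := by omega
      have h3 : ¬ k < n + 1 := by omega
      by_cases h4 : k = n + 1
      · subst h4
        simp [show n + 1 - n = 1 by omega, show n + 1 - 1 = n by omega, h1, h2]
      · have h5 : ¬ k ≤ n + 1 := by omega
        have h6 : k - n ≠ 0 := by omega
        have h7 : k - n ≠ 1 := by omega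
        simp [h1, h2, h3, h5, h6, h7]

-- the one-element transition of B, named for the lemmas
def pvStepB (p : Nat × Nat) (n : Int) : Nat × Nat :=
  let m : Nat := (n % (4294967296 : Int)).toNat
  let ones := (p.1 ^^^ m) &&& ((4294967295 : Nat) ^^^ p.2)
  let twos := (p.2 ^^^ m) &&& ((4294967295 : Nat) ^^^ ones)
  (ones, twos)

theorem pvMaskBit (k : Nat) : (4294967295 : Nat).testBit k = decide (k < 32) := by
  have h : (4294967295 : Nat) = 2 ^ 32 - 1 := by norm_num
  rw [h, Nat.testBit_two_pow_sub_one]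

theorem pvMvalBitHigh (i : Int) (k : Nat) (hk : 32 ≤ k) : (pvMval i).testBit k = false := by
  apply Nat.testBit_lt_two_pow
  calc pvMval i < 2 ^ 32 := pvMval_lt i
    _ ≤ 2 ^ k := Nat.pow_le_pow_right (by norm_num) hk

theorem pvOnesBool (b : Bool) (c : Nat) :
    ((decide (c % 3 = 1) ^^ b) && !(decide (c % 3 = 2))) =
      decide ((c + (if b then 1 else 0)) % 3 = 1) := by
  have h3 : c % 3 < 3 := Nat.mod_lt _ (by norm_num)
  cases b <;> interval_cases h : (c % 3) <;>
    simp [h, show (c + 1) % 3 = (c % 3 + 1) % 3 by omega]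

theorem pvTwosBool (b : Bool) (c : Nat) :
    ((decide (c % 3 = 2) ^^ b) && !(decide ((c + (if b then 1 else 0)) % 3 = 1))) =
      decide ((c + (if b then 1 else 0)) % 3 = 2) := by
  have h3 : c % 3 < 3 := Nat.mod_lt _ (by norm_num)
  cases b <;> interval_cases h : (c % 3) <;>
    simp [h, show (c + 1) % 3 = (c % 3 + 1) % 3 by omega]

theorem pvStepInv (ones twos : Nat) (c : Nat → Nat) (i : Int)
    (ho : ∀ k, ones.testBit k = (decide (k < 32) && decide (c k % 3 = 1)))
    (ht : ∀ k, twos.testBit k = (decide (k < 32) && decide (c k % 3 = 2))) :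
    (∀ k, (pvStepB (ones, twos) i).1.testBit k =
        (decide (k < 32) && decide ((c k + (if (pvMval i).testBit k then 1 else 0)) % 3 = 1))) ∧
    (∀ k, (pvStepB (ones, twos) i).2.testBit k =
        (decide (k < 32) && decide ((c k + (if (pvMval i).testBit k then 1 else 0)) % 3 = 2))) := by
  have hfst : ∀ k, (pvStepB (ones, twos) i).1.testBit k =
      (decide (k < 32) && decide ((c k + (if (pvMval i).testBit k then 1 else 0)) % 3 = 1)) := by
    intro k
    show ((ones ^^^ pvMval i) &&& ((4294967295 : Nat) ^^^ twos)).testBit k = _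
    rw [Nat.testBit_and, Nat.testBit_xor, Nat.testBit_xor, pvMaskBit, ho, ht]
    by_cases hk : k < 32
    · simp only [hk, decide_true, Bool.true_and, Bool.true_xor]
      exact pvOnesBool _ _
    · have hb := pvMvalBitHigh i k (by omega)
      simp [hk, hb]
  refine ⟨hfst, ?_⟩
  intro k
  show ((twos ^^^ pvMval i) &&& ((4294967295 : Nat) ^^^ (pvStepB (ones, twos) i).1)).testBit k = _
  rw [Nat.testBit_and, Nat.testBit_xor, Nat.testBit_xor, pvMaskBit, ht, hfst k]
  by_cases hk : k < 32
  · simp only [hk, decide_true, Bool.true_and, Bool.true_xor]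
    exact pvTwosBool _ _
  · have hb := pvMvalBitHigh i k (by omega)
    simp [hk, hb]

theorem pvFoldInv : ∀ (nums : List Int) (c : Nat → Nat) (ones twos : Nat),
    (∀ k, ones.testBit k = (decide (k < 32) && decide (c k % 3 = 1))) →
    (∀ k, twos.testBit k = (decide (k < 32) && decide (c k % 3 = 2))) →
    (∀ k, (nums.foldl pvStepB (ones, twos)).1.testBit k =
        (decide (k < 32) && decide ((c k + pvCnt nums k) % 3 = 1))) ∧
    (∀ k, (nums.foldl pvStepB (ones, twos)).2.testBit k =
        (decide (k < 32) && decide ((c k + pvCnt nums k) % 3 = 2))) := by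
  intro nums
  induction nums with
  | nil => intro c ones twos ho ht; simp [pvCnt, ho, ht]
  | cons i rest ih =>
    intro c ones twos ho ht
    simp only [List.foldl_cons]
    obtain ⟨h1, h2⟩ := pvStepInv ones twos c i ho ht
    have hbit : ∀ k, pvCnt (i :: rest) k =
        (if (pvMval i).testBit k then 1 else 0) + pvCnt rest k := by
      intro k; simp only [pvCnt, List.countP_cons]
      cases hb : (pvMval i).testBit k <;> simp [Nat.add_comm]
    rcases hstep : pvStepB (ones, twos) i with ⟨o', t'⟩
    rw [hstep] at h1 h2
    have h1' : ∀ k, o'.testBit k =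
        (decide (k < 32) && decide ((c k + (if (pvMval i).testBit k then 1 else 0)) % 3 = 1)) := by
      intro k; simpa using h1 k
    have h2' : ∀ k, t'.testBit k =
        (decide (k < 32) && decide ((c k + (if (pvMval i).testBit k then 1 else 0)) % 3 = 2)) := by
      intro k; simpa using h2 k
    obtain ⟨g1, g2⟩ := ih (fun k => c k + (if (pvMval i).testBit k then 1 else 0)) o' t' h1' h2'
    constructor <;> intro k
    · have harg : c k + pvCnt (i :: rest) k =
          c k + (if (pvMval i).testBit k then 1 else 0) + pvCnt rest k := by
        rw [hbit k]; ring
      rw [harg]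
      simpa using g1 k
    · have harg : c k + pvCnt (i :: rest) k =
          c k + (if (pvMval i).testBit k then 1 else 0) + pvCnt rest k := by
        rw [hbit k]; ring
      rw [harg]
      simpa using g2 k

-- ===== VERDICT (by name: the statement is the Claim_ definition above) =====
theorem singleNumber32N_spec : Claim_equal_singleNumber32N := by
  intro nums hdom
  unfold Spec_singleNumber32N
  simp only [singleNumber32N, singleNumber32N_alt]
  have hall : ∀ i ∈ nums, pvDomInt i = true := by
    rw [Dom_singleNumber32N, List.all_eq_true] at hdom; exact hdom
  -- A's accumulator in terms of pvCnt
  have hA : (List.range 32).foldl (fun ans j =>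
      let sum : Nat := nums.foldl (fun sum i =>
        let num : Nat := if i < 0 then (i % (4294967296 : Int)).toNat else i.toNat
        sum + ((num >>> j) &&& 1)) 0
      ans ||| ((sum % 3) <<< j)) 0 =
    (List.range 32).foldl (fun ans j => ans ||| ((pvCnt nums j % 3) <<< j)) 0 := by
    have hfun : (fun (ans j : Nat) =>
        let sum : Nat := nums.foldl (fun sum i =>
          let num : Nat := if i < 0 then (i % (4294967296 : Int)).toNat else i.toNat
          sum + ((num >>> j) &&& 1)) 0
        ans ||| ((sum % 3) <<< j)) =
        (fun ans j => ans ||| ((pvCnt nums j % 3) <<< j)) := by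
      funext ans j
      rw [show nums.foldl (fun sum i =>
          let num : Nat := if i < 0 then (i % (4294967296 : Int)).toNat else i.toNat
          sum + ((num >>> j) &&& 1)) 0 = 0 + pvCnt nums j from pvSumA j nums 0 hall]
      simp
    rw [hfun]
  rw [hA]
  -- B's pair in terms of pvCnt
  obtain ⟨g1, g2⟩ := pvFoldInv nums (fun _ => 0) 0 0 (by simp) (by simp)
  simp only [Nat.zero_add] at g1 g2
  have hfold : nums.foldl (fun (p : Nat × Nat) n =>
      let m : Nat := (n % (4294967296 : Int)).toNat
      let ones := (p.1 ^^^ m) &&& ((4294967295 : Nat) ^^^ p.2)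
      let twos := (p.2 ^^^ m) &&& ((4294967295 : Nat) ^^^ ones)
      (ones, twos)) (0, 0) = nums.foldl pvStepB (0, 0) := rfl
  rw [hfold]
  -- the two accumulated Nats coincide bit by bit
  have hansr : (List.range 32).foldl (fun ans j => ans ||| ((pvCnt nums j % 3) <<< j)) 0 =
      (nums.foldl pvStepB (0, 0)).1 ||| ((nums.foldl pvStepB (0, 0)).2 <<< 1) := by
    apply Nat.eq_of_testBit_eq
    intro k
    rw [pvAnsBits (pvCnt nums) 32 k, Nat.testBit_or, Nat.testBit_shiftLeft, g1 k]
    by_cases h1 : 1 ≤ k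
    · rw [g2 (k - 1)]
      have : (k - 1 < 32) = (k ≤ 32) := by simp; omega
      simp [h1, this]
    · have hk0 : k = 0 := by omega
      subst hk0; simp
  rw [hansr]
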